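-- pv_equiv track=rewrite | github.com/jgd10/AdventOfCode2024 | day11/src/main.py | strip_leading_zeroes
-- ===== SOURCE A (Python) =====
-- def strip_leading_zeroes(number: tuple[int, ...]) -> tuple[int, ...]:
--     new_num = []
--     first_digit_reached = False
--     for n in number:
--         if n == 0 and first_digit_reached is not True:
--             continue
--         else:
--             new_num.append(n)
--             first_digit_reached = True
--     if len(new_num) == 0:
--         new_num = [0]
--     return tuple(new_num)
-- ===== SOURCE B (Python) =====
-- def strip_leading_zeroes(number: tuple[int, ...]) -> tuple[int, ...]:
--     i = 0
--     while i < len(number) and number[i] == 0: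
--         i += 1
--     return number[i:] or (0,)
-- ===== Notes on version B (the rewrite author's own statement) =====
-- stated objective: simpler
-- what changed: Instead of a flag-guarded append loop rebuilding the tuple element by element, B advances an index past the leading zeros and returns the tail in a single slice (returning a single zero when nothing remains).
import Mathlib
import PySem

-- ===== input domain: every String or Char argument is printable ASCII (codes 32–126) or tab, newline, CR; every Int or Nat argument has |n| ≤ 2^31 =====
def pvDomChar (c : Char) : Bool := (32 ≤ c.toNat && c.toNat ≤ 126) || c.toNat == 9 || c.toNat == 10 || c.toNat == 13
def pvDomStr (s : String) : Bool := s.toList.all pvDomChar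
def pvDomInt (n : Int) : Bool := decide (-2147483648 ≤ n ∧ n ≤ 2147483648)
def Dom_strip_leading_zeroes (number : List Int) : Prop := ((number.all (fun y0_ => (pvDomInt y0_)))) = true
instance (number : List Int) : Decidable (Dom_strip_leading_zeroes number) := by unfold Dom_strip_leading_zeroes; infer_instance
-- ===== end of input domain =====

-- B replaces A's flag-guarded element-by-element append loop by an index scan past the
-- leading zeros followed by one tail slice; same values, same O(n) cost (objective: simpler).

-- ===== PORT A =====
-- the for-loop over `number` with state (new_num, first_digit_reached)
def stripLoopA : List Int → List Int → Bool → List Int × Bool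
  | [], acc, first => (acc, first)
  | n :: rest, acc, first =>
      if n = 0 ∧ first ≠ true then stripLoopA rest acc first
      else stripLoopA rest (acc ++ [n]) true

def strip_leading_zeroes (number : List Int) : List Int :=
  let st := stripLoopA number [] false
  if st.1.length = 0 then [0] else st.1

-- ===== PORT B =====
-- the while-loop advancing past leading zeros, then the slice number[i:]
def stripTailB : List Int → List Int
  | [] => []
  | n :: rest => if n = 0 then stripTailB rest else n :: rest

def strip_leading_zeroes_alt (number : List Int) : List Int :=
  let rest := stripTailB number
  if rest = [] then [0] else rest

-- ===== PRECONDITION & SPEC =====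
def Spec_strip_leading_zeroes (number : List Int) (out : List Int) : Prop := out = strip_leading_zeroes_alt number
instance (number : List Int) (out : List Int) : Decidable (Spec_strip_leading_zeroes number out) := by unfold Spec_strip_leading_zeroes; infer_instance

-- ===== CLAIM (what is proved, stated in full; the proofs are below) =====
def Claim_equal_strip_leading_zeroes : Prop := ∀ (number : List Int), Dom_strip_leading_zeroes number → Spec_strip_leading_zeroes number (strip_leading_zeroes number)

-- ===== LEMMAS AND PROOFS =====

theorem stripLoopA_true (l acc : List Int) : stripLoopA l acc true = (acc ++ l, true) := by
  induction l generalizing acc with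
  | nil => simp [stripLoopA]
  | cons n rest ih => simp [stripLoopA, ih]

theorem stripLoopA_false (l : List Int) : (stripLoopA l [] false).1 = stripTailB l := by
  induction l with
  | nil => rfl
  | cons n rest ih =>
      by_cases h : n = 0
      · simp [stripLoopA, stripTailB, h, ih]
      · simp [stripLoopA, stripTailB, h, stripLoopA_true]

-- ===== VERDICT (by name: the statement is the Claim_ definition above) =====
theorem strip_leading_zeroes_spec : Claim_equal_strip_leading_zeroes := by
  intro number _
  unfold Spec_strip_leading_zeroes strip_leading_zeroes strip_leading_zeroes_alt
  simp [stripLoopA_false, List.length_eq_zero_iff]
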